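-- pv_equiv track=rewrite | github.com/logreg-n-coffee/daily-coding-problems-python | question_309.py | min_cost_to_remove_gaps
-- ===== SOURCE A (Python) =====
-- def min_cost_to_remove_gaps(seats: list[int]) -> int:
--     # Step 1: Find the positions of all people (1s in the list)
--     people_positions = [i for i, x in enumerate(seats) if x == 1]
--
--     # Step 2: Calculate the median position
--     median_index = len(people_positions) // 2
--     median_position = people_positions[median_index]
--
--     # Step 3: Calculate the new ideal positions for people around the median
--     ideal_positions = [median_position + i -
--                        median_index for i in range(len(people_positions))]
--
--     # Step 4: Calculate the cost (sum of absolute differences between current and new positions)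
--     cost = sum(abs(a - b) for a, b in zip(people_positions, ideal_positions))
--
--     return cost
-- ===== SOURCE B (Python) =====
-- def min_cost_to_remove_gaps(seats: list[int]) -> int:
--     # Gap-counting: each empty seat between consecutive people must be
--     # crossed by every person on the smaller side of that gap.
--     people_positions = [i for i, x in enumerate(seats) if x == 1]
--     k = len(people_positions)
--     prev = people_positions[0]
--     cost = 0
--     for j in range(1, k):
--         cur = people_positions[j]
--         cost += (cur - prev - 1) * min(j, k - j)
--         prev = cur
--     return cost
-- ===== Notes on version B (the rewrite author's own statement) =====
-- stated objective: alternative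
-- what changed: Instead of computing the median position, building a list of ideal positions and summing absolute displacements, B scans consecutive people once with a prev pointer and adds each gap's width times min(j, k-j), the number of people that must cross it; no median, no ideal-positions list, no abs.
import Mathlib
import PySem

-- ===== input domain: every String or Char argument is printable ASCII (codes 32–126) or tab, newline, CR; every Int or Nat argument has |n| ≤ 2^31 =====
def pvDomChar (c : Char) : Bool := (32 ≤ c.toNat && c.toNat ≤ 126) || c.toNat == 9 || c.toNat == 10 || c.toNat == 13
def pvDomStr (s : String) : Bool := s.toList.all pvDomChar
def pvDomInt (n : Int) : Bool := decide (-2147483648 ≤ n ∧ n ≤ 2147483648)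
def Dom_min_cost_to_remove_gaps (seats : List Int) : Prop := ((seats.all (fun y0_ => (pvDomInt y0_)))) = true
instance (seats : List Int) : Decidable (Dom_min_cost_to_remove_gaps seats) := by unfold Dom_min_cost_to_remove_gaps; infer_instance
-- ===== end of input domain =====

-- B replaces A's median/ideal-positions computation by a single walk over the gaps between
-- consecutive people, charging each gap its width times the number of people that must cross it
-- (objective: alternative decomposition, same O(n) cost; equal return value whenever A returns).

-- ===== PORT A =====
def min_cost_to_remove_gaps (seats : List Int) : Int :=
  let people_positions :=
    ((PySem.List.enumerate seats 0).filter (fun p => p.2 == 1)).map (fun p => p.1)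
  let median_index : Int := PySem.Int.floordiv (people_positions.length : Int) 2
  -- people_positions[median_index]: IndexError when no seat holds a 1 — excluded by Pre_
  let median_position : Int := PySem.List.pyGetD people_positions median_index 0
  let ideal_positions :=
    (PySem.List.pyRange 0 (people_positions.length : Int) 1).map
      (fun i => median_position + i - median_index)
  ((people_positions.zip ideal_positions).map (fun p => |p.1 - p.2|)).sum

-- ===== PORT B =====
def min_cost_to_remove_gaps_alt (seats : List Int) : Int :=
  let people_positions :=
    ((PySem.List.enumerate seats 0).filter (fun p => p.2 == 1)).map (fun p => p.1)
  let k := people_positions.length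
  -- prev = people_positions[0]: IndexError when no seat holds a 1, exactly as A — excluded by Pre_
  ((PySem.List.pyRange 1 (k : Int) 1).foldl
    (fun (st : Int × Int) j =>
      (st.1 + (PySem.List.pyGetD people_positions j 0 - st.2 - 1) * min j ((k : Int) - j),
       PySem.List.pyGetD people_positions j 0))
    (0, PySem.List.pyGetD people_positions 0 0)).1

-- ===== PRECONDITION & SPEC =====
-- Pre_ excludes exactly the inputs with no seat equal to 1, where A raises IndexError.
def Pre_min_cost_to_remove_gaps (seats : List Int) : Prop := (1 : Int) ∈ seats
instance (seats : List Int) : Decidable (Pre_min_cost_to_remove_gaps seats) := by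
  unfold Pre_min_cost_to_remove_gaps; infer_instance
def pvWitness_min_cost_to_remove_gaps : List Int := [1, 0, 1, 0, 1]

def Spec_min_cost_to_remove_gaps (seats : List Int) (out : Int) : Prop :=
  out = min_cost_to_remove_gaps_alt seats
instance (seats : List Int) (out : Int) : Decidable (Spec_min_cost_to_remove_gaps seats out) := by
  unfold Spec_min_cost_to_remove_gaps; infer_instance

-- ===== CLAIM (what is proved, stated in full; the proofs are below) =====
def Claim_equal_min_cost_to_remove_gaps : Prop :=
  ∀ (seats : List Int), Dom_min_cost_to_remove_gaps seats →
    Pre_min_cost_to_remove_gaps seats →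
    Spec_min_cost_to_remove_gaps seats (min_cost_to_remove_gaps seats)

-- ===== LEMMAS AND PROOFS =====

-- the common first step of both Pythons: indices of the seats holding a 1
def pvPos (seats : List Int) : List Int :=
  ((PySem.List.enumerate seats 0).filter (fun p => p.2 == 1)).map (fun p => p.1)

-- position of person i after subtracting its slot index
def pvQ (ps : List Int) (i : Nat) : Int := ps.getD i 0 - (i : Int)

theorem pvPos_pairwise (seats : List Int) : (pvPos seats).Pairwise (· < ·) := by
  unfold pvPos
  exact List.pairwise_map.mpr ((PySem.List.pairwise_lt_enumerate seats 0).filter _)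

theorem pvPos_ne_nil (seats : List Int) (h : (1 : Int) ∈ seats) : pvPos seats ≠ [] := by
  obtain ⟨n, hn, hv⟩ := List.getElem_of_mem h
  have : ((n : Int)) ∈ pvPos seats := by
    unfold pvPos
    refine List.mem_map.2 ⟨((n : Int), (1 : Int)), ?_, rfl⟩
    refine List.mem_filter.2 ⟨?_, by simp⟩
    exact (PySem.List.mem_enumerate_iff _ _ _).2 ⟨n, hn, by simp [hv]⟩
  exact List.ne_nil_of_mem this

theorem pvQ_step (ps : List Int) (h : ps.Pairwise (· < ·)) (i : Nat) (hi : i + 1 < ps.length) :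
    pvQ ps i ≤ pvQ ps (i + 1) := by
  have hlt : ps[i] < ps[i+1] :=
    (List.pairwise_iff_getElem.1 h) i (i+1) (by omega) hi (by omega)
  unfold pvQ
  rw [List.getD_eq_getElem ps 0 (by omega), List.getD_eq_getElem ps 0 hi]
  push_cast; omega

theorem pvQ_mono (ps : List Int) (h : ps.Pairwise (· < ·)) (i j : Nat) (hij : i ≤ j)
    (hj : j < ps.length) : pvQ ps i ≤ pvQ ps j := by
  induction j with
  | zero => simp_all
  | succ j ih =>
    rcases Nat.lt_or_ge i (j+1) with hlt | hge
    · exact le_trans (ih (by omega) (by omega)) (pvQ_step ps h j hj)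
    · have : i = j + 1 := by omega
      simp [this]

theorem pvQ_telescope (ps : List Int) (a b : Nat) (hab : a ≤ b) :
    ∑ j ∈ Finset.Ico a b, (pvQ ps (j+1) - pvQ ps j) = pvQ ps b - pvQ ps a := by
  rw [Finset.sum_Ico_eq_sub _ hab, Finset.sum_range_sub, Finset.sum_range_sub]
  ring

-- the zip-with-range sum of A, as a Finset sum over indices
theorem pvSum_zip_range (xs : List Int) (f : Nat → Int) :
    ((xs.zip ((List.range xs.length).map f)).map (fun p => |p.1 - p.2|)).sum
    = ∑ i ∈ Finset.range xs.length, |xs.getD i 0 - f i| := by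
  induction xs generalizing f with
  | nil => simp
  | cons x xs ih =>
    simp only [List.length_cons, List.range_succ_eq_map, List.map_cons, List.zip_cons_cons,
      List.map_map, List.sum_cons, Function.comp_def, Nat.succ_eq_add_one]
    rw [Finset.sum_range_succ', ih (fun n => f (n + 1))]
    simp [add_comm]

-- ===== the core identity: median cost = weighted gap sum =====
theorem pvMain (ps : List Int) (hpw : ps.Pairwise (· < ·)) (hne : ps ≠ []) :
    ∑ i ∈ Finset.range ps.length, |pvQ ps i - pvQ ps (ps.length / 2)|
    = ∑ j ∈ Finset.range (ps.length - 1),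
        (pvQ ps (j+1) - pvQ ps j) * min ((j : Int) + 1) ((ps.length : Int) - 1 - j) := by
  have hk1 : 1 ≤ ps.length := by
    cases ps with
    | nil => exact absurd rfl hne
    | cons a l => simp
  set k := ps.length with hk
  set mid := k / 2 with hmid
  have hmidk : mid < k := by omega
  have key : ∀ i ∈ Finset.range k, |pvQ ps i - pvQ ps mid|
      = ∑ j ∈ Finset.range (k-1),
          (if (i ≤ j ∧ j < mid) ∨ (mid ≤ j ∧ j < i) then pvQ ps (j+1) - pvQ ps j else 0) := by
    intro i hi
    have hik : i < k := Finset.mem_range.1 hi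
    rw [← Finset.sum_filter]
    rcases Nat.lt_or_ge mid i with hgt | hle
    · have hfilter : (Finset.range (k-1)).filter
          (fun j => (i ≤ j ∧ j < mid) ∨ (mid ≤ j ∧ j < i)) = Finset.Ico mid i := by
        ext j; simp only [Finset.mem_filter, Finset.mem_range, Finset.mem_Ico]; omega
      rw [hfilter, pvQ_telescope ps mid i (by omega),
          abs_of_nonneg (by linarith [pvQ_mono ps hpw mid i (by omega) hik])]
    · have hfilter : (Finset.range (k-1)).filter
          (fun j => (i ≤ j ∧ j < mid) ∨ (mid ≤ j ∧ j < i)) = Finset.Ico i mid := by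
        ext j; simp only [Finset.mem_filter, Finset.mem_range, Finset.mem_Ico]; omega
      rw [hfilter, pvQ_telescope ps i mid hle, abs_sub_comm,
          abs_of_nonneg (by linarith [pvQ_mono ps hpw i mid hle hmidk])]
  rw [Finset.sum_congr rfl key, Finset.sum_comm]
  refine Finset.sum_congr rfl ?_
  intro j hj
  have hjk : j < k - 1 := Finset.mem_range.1 hj
  rw [← Finset.sum_filter]
  rcases Nat.lt_or_ge j mid with hlt | hge
  · have hfilter : (Finset.range k).filter
        (fun i => (i ≤ j ∧ j < mid) ∨ (mid ≤ j ∧ j < i)) = Finset.range (j+1) := by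
      ext i; simp only [Finset.mem_filter, Finset.mem_range]; omega
    rw [hfilter, Finset.sum_const, Finset.card_range, nsmul_eq_mul]
    have hmin : min ((j : Int) + 1) ((k : Int) - 1 - j) = ((j : Nat) : Int) + 1 := by
      rw [min_eq_left]; omega
    rw [hmin]; push_cast; ring
  · have hfilter : (Finset.range k).filter
        (fun i => (i ≤ j ∧ j < mid) ∨ (mid ≤ j ∧ j < i)) = Finset.Ico (j+1) k := by
      ext i; simp only [Finset.mem_filter, Finset.mem_range, Finset.mem_Ico]; omega
    rw [hfilter, Finset.sum_const, Nat.card_Ico, nsmul_eq_mul]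
    have hmin : min ((j : Int) + 1) ((k : Int) - 1 - j) = ((k - (j+1) : Nat) : Int) := by
      rw [min_eq_right] <;> omega
    rw [hmin]; ring

-- A's port as a Finset sum over pvPos indices
theorem pvA_eq (seats : List Int) :
    min_cost_to_remove_gaps seats
    = ∑ i ∈ Finset.range (pvPos seats).length,
        |pvQ (pvPos seats) i - pvQ (pvPos seats) ((pvPos seats).length / 2)| := by
  have hrw : min_cost_to_remove_gaps seats =
      (((pvPos seats).zip ((PySem.List.pyRange 0 ((pvPos seats).length : Int) 1).map
          (fun i => PySem.List.pyGetD (pvPos seats)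
                      (PySem.Int.floordiv ((pvPos seats).length : Int) 2) 0
                    + i - PySem.Int.floordiv ((pvPos seats).length : Int) 2))).map
        (fun p => |p.1 - p.2|)).sum := rfl
  rw [hrw]
  generalize pvPos seats = ps
  have hmi : PySem.Int.floordiv ((ps.length : Int)) 2 = ((ps.length / 2 : Nat) : Int) := by
    rw [PySem.Int.floordiv_eq_ediv_of_pos (by omega)]; omega
  rw [hmi]
  simp only [PySem.List.pyGetD_natCast]
  rw [PySem.List.pyRange_one]
  have htn : (((ps.length : Int)) - 0).toNat = ps.length := by omega
  rw [htn, List.map_map]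
  simp only [Function.comp_def]
  rw [pvSum_zip_range ps
      (fun t => ps.getD (ps.length / 2) 0 + (0 + (t : Int)) - ((ps.length / 2 : Nat) : Int))]
  refine Finset.sum_congr rfl fun i _ => ?_
  unfold pvQ
  congr 1
  push_cast
  ring

-- loop invariant for B's prev-pointer scan: cost so far and the last position seen
theorem pvB_loop (pp : List Int) (k m : Nat) :
    (List.range m).foldl
      (fun (st : Int × Int) (t : Nat) =>
        (st.1 + (PySem.List.pyGetD pp (1 + (t : Int)) 0 - st.2 - 1)
            * min (1 + (t : Int)) ((k : Int) - (1 + (t : Int))),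
         PySem.List.pyGetD pp (1 + (t : Int)) 0))
      (0, PySem.List.pyGetD pp 0 0)
    = (∑ t ∈ Finset.range m,
        (pp.getD (t+1) 0 - pp.getD t 0 - 1) * min ((t : Int) + 1) ((k : Int) - 1 - t),
       pp.getD m 0) := by
  induction m with
  | zero => simp [PySem.List.pyGetD_zero]
  | succ m ih =>
    rw [List.range_succ, List.foldl_append, ih]
    simp only [List.foldl_cons, List.foldl_nil]
    rw [Finset.sum_range_succ]
    have h1 : (1 : Int) + (m : Int) = ((m + 1 : Nat) : Int) := by push_cast; ring
    rw [h1, PySem.List.pyGetD_natCast]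
    have h2 : (k : Int) - ((m + 1 : Nat) : Int) = (k : Int) - 1 - (m : Int) := by
      push_cast; ring
    rw [h2]
    have h3 : ((m + 1 : Nat) : Int) = (m : Int) + 1 := by push_cast; ring
    rw [h3]

-- B's port as a Finset sum over pvPos indices
theorem pvB_eq (seats : List Int) :
    min_cost_to_remove_gaps_alt seats
    = ∑ j ∈ Finset.range ((pvPos seats).length - 1),
        (pvQ (pvPos seats) (j+1) - pvQ (pvPos seats) j)
          * min ((j : Int) + 1) (((pvPos seats).length : Int) - 1 - j) := by
  have hrw : min_cost_to_remove_gaps_alt seats =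
      ((PySem.List.pyRange 1 ((pvPos seats).length : Int) 1).foldl
        (fun (st : Int × Int) j =>
          (st.1 + (PySem.List.pyGetD (pvPos seats) j 0 - st.2 - 1)
              * min j (((pvPos seats).length : Int) - j),
           PySem.List.pyGetD (pvPos seats) j 0))
        (0, PySem.List.pyGetD (pvPos seats) 0 0)).1 := rfl
  rw [hrw]
  generalize pvPos seats = ps
  rw [PySem.List.pyRange_one]
  have htn : (((ps.length : Int)) - 1).toNat = ps.length - 1 := by omega
  rw [htn, List.foldl_map, pvB_loop ps ps.length (ps.length - 1)]
  dsimp only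
  refine Finset.sum_congr rfl fun j _ => ?_
  unfold pvQ
  congr 1
  push_cast
  ring

-- ===== VERDICT (by name: the statement is the Claim_ definition above) =====
theorem min_cost_to_remove_gaps_spec : Claim_equal_min_cost_to_remove_gaps := by
  intro seats _ hpre
  unfold Spec_min_cost_to_remove_gaps
  rw [pvA_eq seats, pvB_eq seats,
      pvMain (pvPos seats) (pvPos_pairwise seats) (pvPos_ne_nil seats hpre)]
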